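-- pv_equiv track=rewrite | github.com/cknoll/chimcla | src/chimcla/stage_2a1_bar_selection_new.py | find_missing_boxes
-- ===== SOURCE A (Python) =====
-- import itertools as it
--
-- def index_combinations():
--     return list(it.product(range(3), range(27)))
--
-- def find_missing_boxes(bbox_list):
--     """
--     Iterate through a list of (extended) bounding boxes
--     """
--
--     idcs = index_combinations()
--     for bbox in bbox_list:
--         row_col = tuple(bbox[-2:])
--
--         try:
--             idcs.remove(row_col)
--         except ValueError:
--             msg = f"unexpected row_col index pair: {row_col}"
--             raise ValueError(msg)
--
--     # in the nominal case this list is now empty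
--     return idcs
-- ===== SOURCE B (Python) =====
-- import itertools as it
--
--
-- def index_combinations():
--     return list(it.product(range(3), range(27)))
--
--
-- def find_missing_boxes(bbox_list):
--     """Iterate through a list of (extended) bounding boxes."""
--     valid = set(index_combinations())
--     seen = set()
--     for bbox in bbox_list:
--         row_col = tuple(bbox[-2:])
--         if row_col not in valid or row_col in seen:
--             raise ValueError(f"unexpected row_col index pair: {row_col}")
--         seen.add(row_col)
--     return [p for p in index_combinations() if p not in seen]
-- ===== Notes on version B (the rewrite author's own statement) =====
-- stated objective: idiomatic
-- what changed: B keeps a 'seen' set of encountered (row,col) pairs and reconstructs the missing pairs with one filter over the full product, instead of destructively removing pairs from a live list with list.remove.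
import Mathlib
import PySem

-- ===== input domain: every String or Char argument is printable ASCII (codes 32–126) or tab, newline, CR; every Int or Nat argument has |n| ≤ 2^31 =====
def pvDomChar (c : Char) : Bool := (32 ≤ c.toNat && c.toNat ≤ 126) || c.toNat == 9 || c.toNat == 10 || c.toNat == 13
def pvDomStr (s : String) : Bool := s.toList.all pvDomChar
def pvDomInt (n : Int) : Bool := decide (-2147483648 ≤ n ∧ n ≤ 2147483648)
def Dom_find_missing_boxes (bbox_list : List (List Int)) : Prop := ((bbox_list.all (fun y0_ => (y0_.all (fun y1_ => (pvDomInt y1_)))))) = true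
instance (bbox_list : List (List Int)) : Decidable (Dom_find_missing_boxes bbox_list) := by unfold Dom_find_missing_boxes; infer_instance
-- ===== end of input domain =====

-- B replaces A's destructive list.remove loop by a 'seen' set plus one final filter over the
-- full index product (idiomatic; same result, return value only — neither mutates its argument).

-- shared helper: index_combinations() = list(it.product(range(3), range(27)))
def index_combinations : List (Int × Int) :=
  (PySem.List.pyRange 0 3 1).flatMap (fun r => (PySem.List.pyRange 0 27 1).map (fun c => (r, c)))

-- ===== PORT A =====
-- tuple(bbox[-2:]) : a tuple of length ≠ 2 never equals an (Int × Int) pair, so in A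
-- list.remove then raises; we model that case by `none` (raise) directly.
def loopA : List (Int × Int) → List (List Int) → Option (List (Int × Int))
  | idcs, [] => some idcs
  | idcs, bbox :: rest =>
    match PySem.List.slice bbox (some (-2)) none with
    | [a, b] =>
      match PySem.List.remove? idcs (a, b) with
      | some idcs' => loopA idcs' rest
      | none => none          -- ValueError re-raised
    | _ => none               -- short row_col tuple: remove always raises

def find_missing_boxes (bbox_list : List (List Int)) : List (Int × Int) :=
  (loopA index_combinations bbox_list).getD []   -- `none` (raise) is outside Pre_

-- ===== PORT B =====
def validSet : PySem.Set (Int × Int) := PySem.Set.ofList index_combinations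

def loopB : PySem.Set (Int × Int) → List (List Int) → Option (PySem.Set (Int × Int))
  | seen, [] => some seen
  | seen, bbox :: rest =>
    match PySem.List.slice bbox (some (-2)) none with
    | [a, b] =>
      if !(PySem.Set.contains validSet (a, b)) || PySem.Set.contains seen (a, b) then
        none                  -- raise ValueError
      else
        loopB (PySem.Set.add seen (a, b)) rest
    | _ => none               -- short row_col tuple: not in valid, raise

def find_missing_boxes_alt (bbox_list : List (List Int)) : List (Int × Int) :=
  match loopB PySem.Set.empty bbox_list with
  | some seen => index_combinations.filter (fun p => !(PySem.Set.contains seen p))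
  | none => []                -- raise, outside Pre_

-- ===== PRECONDITION & SPEC =====
-- last two elements of a bbox, as the pair tuple(bbox[-2:]) denotes when len(bbox) ≥ 2
def lastPair (l : List Int) : Int × Int :=
  ((l.drop (l.length - 2)).getD 0 0, (l.drop (l.length - 2)).getD 1 0)

-- Pre_ excludes exactly the inputs on which A raises ValueError: some bbox shorter than 2,
-- a (row,col) pair outside product(range(3), range(27)), or a duplicated pair.
def Pre_find_missing_boxes (bbox_list : List (List Int)) : Prop :=
  (∀ bbox ∈ bbox_list, 2 ≤ bbox.length ∧ lastPair bbox ∈ index_combinations) ∧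
  (bbox_list.map lastPair).Nodup

instance (bbox_list : List (List Int)) : Decidable (Pre_find_missing_boxes bbox_list) := by
  unfold Pre_find_missing_boxes; infer_instance

def pvWitness_find_missing_boxes : List (List Int) := [[5, 6, 0, 3], [1, 0], [9, 2, 26]]

def Spec_find_missing_boxes (bbox_list : List (List Int)) (out : List (Int × Int)) : Prop :=
  out = find_missing_boxes_alt bbox_list
instance (bbox_list : List (List Int)) (out : List (Int × Int)) : Decidable (Spec_find_missing_boxes bbox_list out) := by
  unfold Spec_find_missing_boxes; infer_instance

-- ===== CLAIM (what is proved, stated in full; the proofs are below) =====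
def Claim_equal_find_missing_boxes : Prop := ∀ (bbox_list : List (List Int)), Dom_find_missing_boxes bbox_list → Pre_find_missing_boxes bbox_list → Spec_find_missing_boxes bbox_list (find_missing_boxes bbox_list)

-- ===== LEMMAS AND PROOFS =====

theorem nodup_index_combinations : index_combinations.Nodup := by decide

theorem drop_sub_two {l : List Int} (h : 2 ≤ l.length) :
    l.drop (l.length - 2) = [(lastPair l).1, (lastPair l).2] := by
  rcases l with _ | ⟨x, _ | ⟨y, t⟩⟩ <;> simp at h
  · induction t generalizing x y with
    | nil => simp [lastPair]
    | cons z t ih =>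
      have := ih y z
      simp only [List.length_cons] at this ⊢
      have h2 : x :: y :: z :: t = [x] ++ (y :: z :: t) := rfl
      simpa [lastPair, Nat.add_sub_cancel, List.drop_succ_cons,
        Nat.succ_sub_succ] using this

theorem slice_lastPair {l : List Int} (h : 2 ≤ l.length) :
    PySem.List.slice l (some (-2)) none = [(lastPair l).1, (lastPair l).2] := by
  rw [PySem.List.slice_from_neg_ofNat l 2 (by omega), drop_sub_two h]

theorem loop_agree : ∀ (bboxes : List (List Int)) (seen : PySem.Set (Int × Int)),
    (∀ bbox ∈ bboxes, 2 ≤ bbox.length ∧ lastPair bbox ∈ index_combinations) →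
    (bboxes.map lastPair).Nodup →
    (∀ bbox ∈ bboxes, lastPair bbox ∉ seen) →
    loopA (index_combinations.filter (fun p => !(PySem.Set.contains seen p))) bboxes
      = (loopB seen bboxes).map
          (fun s => index_combinations.filter (fun p => !(PySem.Set.contains s p)))
  | [], seen, _, _, _ => by simp [loopA, loopB]
  | bbox :: rest, seen, hok, hnd, hseen => by
    obtain ⟨hlen, hmem⟩ := hok bbox (List.mem_cons_self)
    have hsl := slice_lastPair hlen
    set rc := lastPair bbox with hrc
    have hnotmem : rc ∉ seen := hseen bbox List.mem_cons_self
    have hvalidmem : rc ∈ validSet := (PySem.Set.mem_ofList _ _).mpr hmem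
    have hin : rc ∈ index_combinations.filter (fun p => !(PySem.Set.contains seen p)) :=
      List.mem_filter.mpr ⟨hmem, by simp [hnotmem]⟩
    have hrm := PySem.List.remove?_eq_some_erase _ rc hin
    have hfilnd : (index_combinations.filter (fun p => !(PySem.Set.contains seen p))).Nodup :=
      nodup_index_combinations.filter _
    have herase :
        (index_combinations.filter (fun p => !(PySem.Set.contains seen p))).erase rc
          = index_combinations.filter (fun p => !(PySem.Set.contains (PySem.Set.add seen rc) p)) := by
      rw [hfilnd.erase_eq_filter]
      rw [List.filter_filter]
      apply List.filter_congr
      intro p _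
      by_cases hp : p = rc
      · simp [hp, PySem.Set.mem_add]
      · simp [PySem.Set.mem_add, hp]
    have hcond : (!(PySem.Set.contains validSet rc) || PySem.Set.contains seen rc) = false := by
      simp [hvalidmem, hnotmem]
    rw [List.map_cons, List.nodup_cons] at hnd
    obtain ⟨hhead, htail⟩ := hnd
    simp only [loopA, loopB, hsl, hrm, hcond, Bool.false_eq_true, if_false, herase]
    apply loop_agree rest (PySem.Set.add seen rc)
    · exact fun b hb => hok b (List.mem_cons_of_mem _ hb)
    · exact htail
    · intro b hb
      have hne : lastPair b ≠ rc := fun he =>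
        hhead ((he.trans hrc) ▸ List.mem_map_of_mem hb)
      have hbs : lastPair b ∉ seen := hseen b (List.mem_cons_of_mem _ hb)
      rw [PySem.Set.mem_add]
      exact fun h => h.elim hbs hne

-- ===== VERDICT (by name: the statement is the Claim_ definition above) =====
theorem find_missing_boxes_spec : Claim_equal_find_missing_boxes := by
  intro bbox_list _hdom hpre
  obtain ⟨hok, hnd⟩ := hpre
  unfold Spec_find_missing_boxes find_missing_boxes find_missing_boxes_alt
  have h := loop_agree bbox_list PySem.Set.empty hok hnd
    (fun b _ => by simp [PySem.Set.empty])
  have hstart : index_combinations.filter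
      (fun p => !(PySem.Set.contains PySem.Set.empty p)) = index_combinations := by
    simp [PySem.Set.empty, PySem.Set.contains]
  rw [hstart] at h
  rw [h]
  cases loopB PySem.Set.empty bbox_list <;> simp
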